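-- pv_equiv track=rewrite | github.com/OleJBondahl/PySchemaElectrical | src/pyschemaelectrical/utils/export_utils.py | _merge_terminal_rows
-- ===== SOURCE A (Python) =====
-- def _merge_terminal_rows(rows: list[list[str]]) -> list[str]:
--     """Merge multiple CSV rows that share the same (Terminal Tag, Terminal Pin).
--
--     When the same terminal pin appears in more than one row (e.g. once from
--     the registry export and once from an external-connections append), this
--     function collapses them into a single row.  It collects all
--     ``(component, pin)`` pairs from both the FROM side (columns 0-1) and
--     the TO side (columns 4-5), then distributes them so that one pair ends
--     up on each side.
--
--     The **last** FROM entry is kept on the FROM side (this is typically the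
--     external device that was appended after the registry export).  Excess
--     entries are moved to the opposite side to fill vacancies.
--
--     Any non-empty ``Internal Bridge`` value (column 6) found in any of the
--     input rows is preserved on the merged result.
--
--     Args:
--         rows: Two or more CSV data rows (lists of strings) that share the
--             same Terminal Tag (index 2) and Terminal Pin (index 3).
--
--     Returns:
--         A single merged row as a list of strings with 7 columns:
--         ``[Component From, Pin From, Terminal Tag, Terminal Pin,
--         Component To, Pin To, Internal Bridge]``.
--     """
--     from_entries: list[tuple[str, str]] = []
--     to_entries: list[tuple[str, str]] = []
--     bridge = ""
--     term_tag = rows[0][2]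
--     term_pin = rows[0][3]
--
--     for row in rows:
--         if row[0]:
--             from_entries.append((row[0], row[1]))
--         if len(row) > 4 and row[4]:
--             to_entries.append((row[4], row[5]))
--         if len(row) > 6 and row[6]:
--             bridge = row[6]
--
--     # Balance: move excess FROM entries to TO and vice versa
--     while len(from_entries) > 1 and len(to_entries) < 1:
--         to_entries.append(from_entries.pop(0))
--     while len(to_entries) > 1 and len(from_entries) < 1:
--         from_entries.append(to_entries.pop(0))
--
--     # Last FROM entry is typically the external device (appended after registry)
--     comp_from = from_entries[-1][0] if from_entries else ""
--     pin_from = from_entries[-1][1] if from_entries else ""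
--     comp_to = to_entries[0][0] if to_entries else ""
--     pin_to = to_entries[0][1] if to_entries else ""
--
--     return [comp_from, pin_from, term_tag, term_pin, comp_to, pin_to, bridge]
-- ===== SOURCE B (Python) =====
-- def _merge_terminal_rows(rows: list[list[str]]) -> list[str]:
--     """Merge rows sharing (tag, pin): comprehensions + explicit case logic
--     instead of append-loops and balancing while-loops."""
--     tag, pin = rows[0][2], rows[0][3]
--     F = [(r[0], r[1]) for r in rows if r[0]]
--     T = [(r[4], r[5]) for r in rows if len(r) > 4 and r[4]]
--     bs = [r[6] for r in rows if len(r) > 6 and r[6]]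
--     bridge = bs[-1] if bs else ""
--     if not F and not T:
--         cf, ct = ("", ""), ("", "")
--     elif not T:
--         cf, ct = ((F[-1], F[0]) if len(F) > 1 else (F[0], ("", "")))
--     elif not F:
--         cf, ct = ((T[0], T[1]) if len(T) > 1 else (("", ""), T[0]))
--     else:
--         cf, ct = F[-1], T[0]
--     return [cf[0], cf[1], tag, pin, ct[0], ct[1], bridge]
-- ===== Notes on version B (the rewrite author's own statement) =====
-- stated objective: simpler
-- what changed: Replaces the mutating append-loop plus two balancing while-loops (pop(0)/append) with three comprehensions and one explicit case analysis over the five (empty/singleton/multi) side shapes that computes the final pairs directly.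
import Mathlib
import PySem

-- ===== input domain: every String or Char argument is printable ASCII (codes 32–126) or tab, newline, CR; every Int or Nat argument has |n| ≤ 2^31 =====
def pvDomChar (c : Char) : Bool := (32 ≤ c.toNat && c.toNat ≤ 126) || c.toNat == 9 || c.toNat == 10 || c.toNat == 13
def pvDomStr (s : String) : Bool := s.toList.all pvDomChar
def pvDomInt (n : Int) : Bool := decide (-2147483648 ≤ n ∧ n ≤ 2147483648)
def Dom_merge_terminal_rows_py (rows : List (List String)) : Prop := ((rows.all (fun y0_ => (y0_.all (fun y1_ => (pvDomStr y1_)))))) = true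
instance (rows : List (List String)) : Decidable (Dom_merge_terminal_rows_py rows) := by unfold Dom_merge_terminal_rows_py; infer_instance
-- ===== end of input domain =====

-- B replaces A's mutating append-loop and the two balancing while-loops by comprehensions and one case analysis (objective: simpler).

-- ===== PORT A =====
-- one iteration of A's for-loop; state = (from_entries, to_entries, bridge)
def pvStepA (st : List (String × String) × List (String × String) × String)
    (row : List String) : List (String × String) × List (String × String) × String :=
  let F := if row.getD 0 "" ≠ "" then st.1 ++ [(row.getD 0 "", row.getD 1 "")] else st.1
  let T := if 4 < row.length ∧ row.getD 4 "" ≠ "" then st.2.1 ++ [(row.getD 4 "", row.getD 5 "")] else st.2.1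
  let b := if 6 < row.length ∧ row.getD 6 "" ≠ "" then row.getD 6 "" else st.2.2
  (F, T, b)

-- A's first while-loop: while len(from_entries) > 1 and len(to_entries) < 1: to.append(from.pop(0))
def pvBalance1 (F T : List (String × String)) : List (String × String) × List (String × String) :=
  if 1 < F.length ∧ T.length < 1 then pvBalance1 (F.drop 1) (T ++ F.take 1) else (F, T)
termination_by F.length
decreasing_by simp; omega

-- A's second while-loop: while len(to_entries) > 1 and len(from_entries) < 1: from.append(to.pop(0))
def pvBalance2 (F T : List (String × String)) : List (String × String) × List (String × String) :=
  if 1 < T.length ∧ F.length < 1 then pvBalance2 (F ++ T.take 1) (T.drop 1) else (F, T)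
termination_by T.length
decreasing_by simp; omega

def merge_terminal_rows_py (rows : List (List String)) : List String :=
  let term_tag := (rows.getD 0 []).getD 2 ""
  let term_pin := (rows.getD 0 []).getD 3 ""
  let st := rows.foldl pvStepA ([], [], "")
  let bridge := st.2.2
  let p1 := pvBalance1 st.1 st.2.1
  let p2 := pvBalance2 p1.1 p1.2
  let F := p2.1
  let T := p2.2
  let comp_from := if F ≠ [] then (F.getLastD ("", "")).1 else ""
  let pin_from := if F ≠ [] then (F.getLastD ("", "")).2 else ""
  let comp_to := if T ≠ [] then (T.headD ("", "")).1 else ""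
  let pin_to := if T ≠ [] then (T.headD ("", "")).2 else ""
  [comp_from, pin_from, term_tag, term_pin, comp_to, pin_to, bridge]

-- ===== PORT B =====
def merge_terminal_rows_py_alt (rows : List (List String)) : List String :=
  let tag := (rows.getD 0 []).getD 2 ""
  let pin := (rows.getD 0 []).getD 3 ""
  let F := (rows.filter (fun r => r.getD 0 "" != "")).map (fun r => (r.getD 0 "", r.getD 1 ""))
  let T := (rows.filter (fun r => decide (4 < r.length) && (r.getD 4 "" != ""))).map
      (fun r => (r.getD 4 "", r.getD 5 ""))
  let bs := (rows.filter (fun r => decide (6 < r.length) && (r.getD 6 "" != ""))).map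
      (fun r => r.getD 6 "")
  let bridge := bs.getLastD ""
  let (cf, ct) :=
    match F, T with
    | [], [] => (("", ""), ("", ""))
    | f :: fs, [] =>
        match fs with
        | [] => (f, ("", ""))
        | _ :: _ => ((f :: fs).getLastD ("", ""), f)
    | [], t :: ts =>
        match ts with
        | [] => (("", ""), t)
        | t2 :: _ => (t, t2)
    | f :: fs, t :: _ => ((f :: fs).getLastD ("", ""), t)
  [cf.1, cf.2, tag, pin, ct.1, ct.2, bridge]

-- ===== PRECONDITION & SPEC =====
-- Pre_: exactly the inputs where Python A returns (no IndexError): rows nonempty, rows[0] has the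
-- tag/pin columns, every row is nonempty, has the pin column next to any nonempty component column
-- (index 1 next to 0, index 5 next to a reachable 4).
def Pre_merge_terminal_rows_py (rows : List (List String)) : Prop :=
  rows ≠ [] ∧ 4 ≤ (rows.headD []).length ∧
  ∀ r ∈ rows, r ≠ [] ∧ (r.getD 0 "" ≠ "" → 2 ≤ r.length) ∧
    (4 < r.length → r.getD 4 "" ≠ "" → 6 ≤ r.length)
instance (rows : List (List String)) : Decidable (Pre_merge_terminal_rows_py rows) := by
  unfold Pre_merge_terminal_rows_py; infer_instance
def pvWitness_merge_terminal_rows_py : List (List String) :=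
  [["A", "1", "X1", "2", "B", "3", "BR"], ["C", "4", "X1", "2"]]
def Spec_merge_terminal_rows_py (rows : List (List String)) (out : List String) : Prop := out = merge_terminal_rows_py_alt rows
instance (rows : List (List String)) (out : List String) : Decidable (Spec_merge_terminal_rows_py rows out) := by unfold Spec_merge_terminal_rows_py; infer_instance

-- ===== CLAIM (what is proved, stated in full; the proofs are below) =====
def Claim_equal_merge_terminal_rows_py : Prop := ∀ (rows : List (List String)), Dom_merge_terminal_rows_py rows → Pre_merge_terminal_rows_py rows → Spec_merge_terminal_rows_py rows (merge_terminal_rows_py rows)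

-- ===== LEMMAS AND PROOFS =====

-- A's collection loop computes exactly B's three comprehensions (bridge = last non-empty col 6).
theorem merge_fold_eq (rows : List (List String)) (F0 T0 : List (String × String)) (b0 : String) :
    rows.foldl pvStepA (F0, T0, b0) =
      (F0 ++ (rows.filter (fun r => r.getD 0 "" != "")).map (fun r => (r.getD 0 "", r.getD 1 "")),
       T0 ++ (rows.filter (fun r => decide (4 < r.length) && (r.getD 4 "" != ""))).map
          (fun r => (r.getD 4 "", r.getD 5 "")),
       ((rows.filter (fun r => decide (6 < r.length) && (r.getD 6 "" != ""))).map
          (fun r => r.getD 6 "")).getLastD b0) := by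
  induction rows generalizing F0 T0 b0 with
  | nil => simp
  | cons r rs ih =>
    simp only [List.foldl_cons, pvStepA]
    rw [ih]
    simp only [List.filter_cons]
    refine Prod.ext ?_ (Prod.ext ?_ ?_)
    · by_cases hc : (r.getD 0 "" != "") = true
      · have hp : r.getD 0 "" ≠ "" := by simpa using hc
        rw [if_pos hp, if_pos hc, List.map_cons]; simp
      · have hp : ¬(r.getD 0 "" ≠ "") := fun h => h (by simpa using hc)
        rw [if_neg hp, if_neg hc]
    · by_cases hc : (decide (4 < r.length) && (r.getD 4 "" != "")) = true
      · have hp : 4 < r.length ∧ r.getD 4 "" ≠ "" := by simpa using hc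
        rw [if_pos hp, if_pos hc, List.map_cons]; simp
      · have hp : ¬(4 < r.length ∧ r.getD 4 "" ≠ "") := fun h =>
          hc (by simp only [Bool.and_eq_true, decide_eq_true_eq, bne_iff_ne]; exact h)
        rw [if_neg hp, if_neg hc]
    · by_cases hc : (decide (6 < r.length) && (r.getD 6 "" != "")) = true
      · have hp : 6 < r.length ∧ r.getD 6 "" ≠ "" := by simpa using hc
        rw [if_pos hp, if_pos hc, List.map_cons, List.getLastD_cons]
      · have hp : ¬(6 < r.length ∧ r.getD 6 "" ≠ "") := fun h =>
          hc (by simp only [Bool.and_eq_true, decide_eq_true_eq, bne_iff_ne]; exact h)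
        rw [if_neg hp, if_neg hc]

theorem merge_terminal_rows_py_eq (rows : List (List String)) :
    merge_terminal_rows_py rows = merge_terminal_rows_py_alt rows := by
  unfold merge_terminal_rows_py merge_terminal_rows_py_alt
  rw [merge_fold_eq]
  simp only [List.nil_append]
  set F := (rows.filter (fun r => r.getD 0 "" != "")).map (fun r => (r.getD 0 "", r.getD 1 "")) with hF
  set T := (rows.filter (fun r => decide (4 < r.length) && (r.getD 4 "" != ""))).map
      (fun r => (r.getD 4 "", r.getD 5 "")) with hT
  clear hF hT
  match F, T with
  | [], [] => simp [pvBalance1, pvBalance2]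
  | [f], [] => simp [pvBalance1, pvBalance2]
  | f :: f2 :: fs, [] =>
      have h1 : 1 < (f :: f2 :: fs).length ∧ ([] : List (String × String)).length < 1 := by
        simp only [List.length_cons, List.length_nil]; omega
      rw [pvBalance1, if_pos h1]
      have h2 : ¬(1 < ((f :: f2 :: fs).drop 1).length ∧
          (([] : List (String × String)) ++ (f :: f2 :: fs).take 1).length < 1) := by
        simp only [List.length_drop, List.length_cons, List.length_append, List.length_take]; omega
      rw [pvBalance1, if_neg h2]
      have h3 : ¬(1 < (([] : List (String × String)) ++ (f :: f2 :: fs).take 1).length ∧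
          ((f :: f2 :: fs).drop 1).length < 1) := by
        simp only [List.length_drop, List.length_cons, List.length_append, List.length_take]; omega
      rw [pvBalance2, if_neg h3]
      simp
  | [], [t] => simp [pvBalance1, pvBalance2]
  | [], t :: t2 :: ts =>
      have h1 : ¬(1 < ([] : List (String × String)).length ∧ (t :: t2 :: ts).length < 1) := by
        simp only [List.length_cons, List.length_nil]; omega
      rw [pvBalance1, if_neg h1]
      have h2 : 1 < (t :: t2 :: ts).length ∧ ([] : List (String × String)).length < 1 := by
        simp only [List.length_cons, List.length_nil]; omega
      rw [pvBalance2, if_pos h2]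
      have h3 : ¬(1 < ((t :: t2 :: ts).drop 1).length ∧
          (([] : List (String × String)) ++ (t :: t2 :: ts).take 1).length < 1) := by
        simp only [List.length_drop, List.length_cons, List.length_append, List.length_take]; omega
      rw [pvBalance2, if_neg h3]
      simp
  | f :: fs, t :: ts =>
      have h1 : ¬(1 < (f :: fs).length ∧ (t :: ts).length < 1) := by
        simp only [List.length_cons]; omega
      rw [pvBalance1, if_neg h1]
      have h2 : ¬(1 < (t :: ts).length ∧ (f :: fs).length < 1) := by
        simp only [List.length_cons]; omega
      rw [pvBalance2, if_neg h2]
      cases fs <;> simp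

-- ===== VERDICT (by name: the statement is the Claim_ definition above) =====
theorem merge_terminal_rows_py_spec : Claim_equal_merge_terminal_rows_py := by
  intro rows _ _
  unfold Spec_merge_terminal_rows_py
  exact merge_terminal_rows_py_eq rows
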